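-- pv_equiv track=rewrite | github.com/posl/comment_recommendation | script/mod_gen/4_time/en/161_D/2.py | lunlun
-- ===== SOURCE A (Python) =====
-- def lunlun(n):
--     if n < 10:
--         return True
--     d = n % 10
--     n //= 10
--     while n > 0:
--         if abs(n % 10 - d) > 1:
--             return False
--         d = n % 10
--         n //= 10
--     return True
-- ===== SOURCE B (Python) =====
-- def lunlun(n):
--     if n < 10:
--         return True
--     s = str(n)
--     return all(abs(ord(s[i]) - ord(s[i + 1])) <= 1 for i in range(len(s) - 1))
-- ===== Notes on version B (the rewrite author's own statement) =====
-- stated objective: idiomatic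
-- what changed: B converts the number to its decimal string once and evaluates a single short-circuiting all() over adjacent character pairs (most-significant-first), instead of A's while loop peeling digits with %/// and a carried accumulator.
import Mathlib
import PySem

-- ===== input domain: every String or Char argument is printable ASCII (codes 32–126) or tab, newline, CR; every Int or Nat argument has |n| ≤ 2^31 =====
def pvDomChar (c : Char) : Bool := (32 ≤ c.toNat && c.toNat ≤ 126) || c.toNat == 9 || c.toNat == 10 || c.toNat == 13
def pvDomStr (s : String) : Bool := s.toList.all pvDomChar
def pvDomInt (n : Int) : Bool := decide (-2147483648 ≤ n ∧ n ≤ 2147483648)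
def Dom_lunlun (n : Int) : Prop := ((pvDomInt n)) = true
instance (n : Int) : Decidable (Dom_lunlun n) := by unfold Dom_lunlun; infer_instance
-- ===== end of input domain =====

-- B converts the number to its decimal string once and checks adjacent character pairs
-- most-significant-first, instead of A's digit-peeling while loop with %/// and an accumulator.

-- ===== PORT A =====
-- the 'while n > 0:' loop; carries the previous digit d
def lunlunLoop (n d : Int) : Bool :=
  if _h : n > 0 then
    if |PySem.Int.mod n 10 - d| > 1 then false
    else lunlunLoop (PySem.Int.floordiv n 10) (PySem.Int.mod n 10)
  else true
termination_by n.toNat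
decreasing_by
  rw [PySem.Int.floordiv_eq_ediv_of_pos (by omega)]
  omega

def lunlun (n : Int) : Bool :=
  if n < 10 then true
  else lunlunLoop (PySem.Int.floordiv n 10) (PySem.Int.mod n 10)

-- ===== PORT B =====
def lunlun_alt (n : Int) : Bool :=
  if n < 10 then true
  else
    let s := PySem.Int.toChars n
    (PySem.List.pyRange 0 ((s.length : Int) - 1) 1).all fun i =>
      |((PySem.List.pyGetD s i ' ').toNat : Int) - ((PySem.List.pyGetD s (i + 1) ' ').toNat : Int)| ≤ 1

-- ===== PRECONDITION & SPEC =====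
def Spec_lunlun (n : Int) (out : Bool) : Prop := out = lunlun_alt n
instance (n : Int) (out : Bool) : Decidable (Spec_lunlun n out) := by unfold Spec_lunlun; infer_instance

-- ===== CLAIM (what is proved, stated in full; the proofs are below) =====
def Claim_equal_lunlun : Prop := ∀ (n : Int), Dom_lunlun n → Spec_lunlun n (lunlun n)

-- ===== LEMMAS AND PROOFS =====

-- digits of n, least significant first (empty for n ≤ 0)
def intDigits (n : Int) : List Int :=
  if _h : n > 0 then PySem.Int.mod n 10 :: intDigits (PySem.Int.floordiv n 10)
  else []
termination_by n.toNat
decreasing_by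
  rw [PySem.Int.floordiv_eq_ediv_of_pos (by omega)]
  omega

-- adjacent-pairs check on an Int list
def adjI : List Int → Bool
  | a :: b :: t => (|b - a| ≤ 1) && adjI (b :: t)
  | _ => true

-- adjacent-pairs check on a Char list, comparing code points
def adjC : List Char → Bool
  | a :: b :: t => (|(b.toNat : Int) - (a.toNat : Int)| ≤ 1) && adjC (b :: t)
  | _ => true

lemma adjI_iff (l : List Int) : adjI l = true ↔ l.IsChain (fun a b => |b - a| ≤ 1) := by
  match l with
  | [] => simp [adjI]
  | [a] => simp [adjI]
  | a :: b :: t =>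
    rw [adjI, List.isChain_cons_cons, Bool.and_eq_true, decide_eq_true_iff, adjI_iff (b :: t)]

lemma adjI_reverse (l : List Int) : adjI l.reverse = adjI l := by
  rw [Bool.eq_iff_iff, adjI_iff, adjI_iff, List.isChain_reverse]
  constructor <;> exact fun h => h.imp (by intro a b hab; rw [abs_sub_comm]; exact hab)

lemma lunlunLoop_eq (n d : Int) : lunlunLoop n d = adjI (d :: intDigits n) := by
  rw [lunlunLoop, intDigits]
  by_cases h : n > 0
  · rw [dif_pos h, dif_pos h, adjI, lunlunLoop_eq (PySem.Int.floordiv n 10) (PySem.Int.mod n 10)]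
    by_cases habs : |PySem.Int.mod n 10 - d| > 1
    · rw [if_pos habs, decide_eq_false (show ¬ (|PySem.Int.mod n 10 - d| ≤ 1) by omega),
        Bool.false_and]
    · rw [if_neg habs, decide_eq_true (show |PySem.Int.mod n 10 - d| ≤ 1 by omega),
        Bool.true_and]
  · rw [dif_neg h, dif_neg h]
    rfl
termination_by n.toNat
decreasing_by
  rw [PySem.Int.floordiv_eq_ediv_of_pos (by omega)]
  omega

lemma intDigits_mem (n x : Int) (hx : x ∈ intDigits n) : 0 ≤ x ∧ x < 10 := by
  rw [intDigits] at hx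
  split at hx
  · rcases List.mem_cons.mp hx with h | h
    · subst h
      exact ⟨PySem.Int.mod_nonneg _ (by omega), PySem.Int.mod_lt _ (by omega)⟩
    · exact intDigits_mem _ x h
  · simp at hx
termination_by n.toNat
decreasing_by
  rw [PySem.Int.floordiv_eq_ediv_of_pos (by omega)]
  omega

lemma digitChar_toNat (a : Nat) (ha : a < 10) : (Nat.digitChar a).toNat = 48 + a := by
  interval_cases a <;> decide

-- toChars of a positive n is the reversed digit list rendered as characters
lemma toChars_pos (n : Int) (hn : 0 < n) :
    PySem.Int.toChars n = ((intDigits n).reverse.map fun x => Nat.digitChar x.toNat) := by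
  have h10 : PySem.Int.floordiv n 10 = n / 10 := PySem.Int.floordiv_eq_ediv_of_pos (by omega)
  have hm : PySem.Int.mod n 10 = n % 10 := PySem.Int.mod_eq_emod_of_pos (by omega)
  rw [PySem.Int.toChars, if_neg (by omega), intDigits, dif_pos hn]
  by_cases hbig : 10 ≤ n
  · rw [Nat.toDigits_of_base_le (by omega) (by omega)]
    have hq : 0 < n / 10 := by omega
    have hrec := toChars_pos (n / 10) hq
    rw [PySem.Int.toChars, if_neg (by omega)] at hrec
    have hdiv : n.toNat / 10 = (n / 10).toNat := by omega
    have hmod : n.toNat % 10 = (n % 10).toNat := by omega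
    rw [hdiv, hmod, hrec, h10, hm]
    simp
  · rw [Nat.toDigits_of_lt_base (by omega)]
    have hz : n / 10 = 0 := by omega
    rw [h10, hz, intDigits, dif_neg (by omega), hm]
    have : n % 10 = n := by omega
    simp [this]
termination_by n.toNat
decreasing_by omega

-- code-point adjacency on rendered digits agrees with value adjacency
lemma adjC_map (l : List Int) (hl : ∀ x ∈ l, 0 ≤ x ∧ x < 10) :
    adjC (l.map fun x => Nat.digitChar x.toNat) = adjI l := by
  match l with
  | [] => rfl
  | [a] => rfl
  | a :: b :: t =>
    have ha := hl a (by simp)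
    have hb := hl b (by simp)
    have ih := adjC_map (b :: t) (fun x hx => hl x (List.mem_cons_of_mem a hx))
    simp only [List.map_cons] at ih ⊢
    rw [adjC, adjI, ih,
      digitChar_toNat a.toNat (by omega), digitChar_toNat b.toNat (by omega)]
    congr 1
    rw [show ((48 + b.toNat : Nat) : Int) - ((48 + a.toNat : Nat) : Int) = b - a by
      push_cast; omega]

-- B's indexed all() over the string equals the structural adjacent-pairs check
lemma all_range_adjC (cs : List Char) :
    ((PySem.List.pyRange 0 ((cs.length : Int) - 1) 1).all fun i =>
      |((PySem.List.pyGetD cs i ' ').toNat : Int) - ((PySem.List.pyGetD cs (i + 1) ' ').toNat : Int)| ≤ 1)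
    = adjC cs := by
  match cs with
  | [] => rfl
  | [a] => rfl
  | a :: b :: t =>
    have hlen : ((a :: b :: t).length : Int) - 1 = ((b :: t).length : Int) := by
      push_cast [List.length_cons]
      ring
    have hL : (0 : Int) < ((b :: t).length : Int) := by
      push_cast [List.length_cons]
      omega
    rw [hlen, PySem.List.pyRange_one_cons hL, List.all_cons, adjC]
    congr 1
    · -- the i = 0 pair is the head pair (a, b)
      rw [PySem.List.pyGetD_zero_cons,
        show ((0 : Int) + 1) = ((1 : Nat) : Int) by norm_num, PySem.List.pyGetD_natCast]
      simp only [List.getD_cons_succ, List.getD_cons_zero, decide_eq_decide]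
      rw [abs_sub_comm]
    · -- the i ≥ 1 pairs are the pairs of the tail, shifted by one
      rw [zero_add, ← all_range_adjC (b :: t),
        PySem.List.pyRange_one 1 ((b :: t).length : Int),
        PySem.List.pyRange_one 0 (((b :: t).length : Int) - 1),
        show ((b :: t).length : Int) - 1 - 0 = ((b :: t).length : Int) - 1 from sub_zero _]
      simp only [List.all_map, Function.comp_def]
      refine List.all_congr rfl ?_
      intro k
      have g1 : PySem.List.pyGetD (a :: b :: t) ((1 : Int) + ↑k) ' '
          = PySem.List.pyGetD (b :: t) ((0 : Int) + ↑k) ' ' := by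
        rw [show (1 : Int) + ↑k = ((k + 1 : Nat) : Int) by push_cast; ring,
          show (0 : Int) + ↑k = ((k : Nat) : Int) by ring,
          PySem.List.pyGetD_natCast, PySem.List.pyGetD_natCast, List.getD_cons_succ]
      have g2 : PySem.List.pyGetD (a :: b :: t) ((1 : Int) + ↑k + 1) ' '
          = PySem.List.pyGetD (b :: t) ((0 : Int) + ↑k + 1) ' ' := by
        rw [show (1 : Int) + ↑k + 1 = ((k + 2 : Nat) : Int) by push_cast; ring,
          show (0 : Int) + ↑k + 1 = ((k + 1 : Nat) : Int) by push_cast; ring,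
          PySem.List.pyGetD_natCast, PySem.List.pyGetD_natCast, List.getD_cons_succ]
      rw [g1, g2]

-- ===== VERDICT (by name: the statement is the Claim_ definition above) =====
theorem lunlun_spec : Claim_equal_lunlun := by
  intro n _
  unfold Spec_lunlun lunlun lunlun_alt
  by_cases hn : n < 10
  · rw [if_pos hn, if_pos hn]
  · rw [if_neg hn, if_neg hn]
    have hpos : (0 : Int) < n := by omega
    rw [lunlunLoop_eq, all_range_adjC, toChars_pos n hpos,
      adjC_map ((intDigits n).reverse) (fun x hx => intDigits_mem n x (List.mem_reverse.mp hx)), adjI_reverse]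
    -- unfold intDigits once on the right: for n > 0 it is mod :: intDigits (floordiv)
    conv_rhs => rw [intDigits, dif_pos hpos]
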